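-- pv_equiv track=rewrite | github.com/algorand/go-algorand | test/heapwatch/metrics_delta.py | metrics_delta
-- ===== SOURCE A (Python) =====
-- def metrics_delta(a,b):
--     old_unseen = set(a.keys())
--     d = dict()
--     for k,bv in b.items():
--         if k in a:
--             av = a.get(k, 0)
--             d[k] = bv-av
--             old_unseen.remove(k)
--         else:
--             d[k] = bv
--     for k in old_unseen:
--         d[k] = 0-a[k]
--     return d
-- ===== SOURCE B (Python) =====
-- def metrics_delta(a, b):
--     # One uniform pass over the union of both key sets; absent keys count as 0.
--     return {k: b.get(k, 0) - a.get(k, 0) for k in b.keys() | a.keys()}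
-- ===== Notes on version B (the rewrite author's own statement) =====
-- stated objective: simpler
-- what changed: B replaces A's two loops, the per-key branch and the old_unseen set bookkeeping by a single uniform comprehension over the union of the two key sets, computing b.get(k,0)-a.get(k,0) for every key; Pre_ excludes association lists with duplicate keys, which do not represent a Python dict (a dict's keys are unique).
import Mathlib
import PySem

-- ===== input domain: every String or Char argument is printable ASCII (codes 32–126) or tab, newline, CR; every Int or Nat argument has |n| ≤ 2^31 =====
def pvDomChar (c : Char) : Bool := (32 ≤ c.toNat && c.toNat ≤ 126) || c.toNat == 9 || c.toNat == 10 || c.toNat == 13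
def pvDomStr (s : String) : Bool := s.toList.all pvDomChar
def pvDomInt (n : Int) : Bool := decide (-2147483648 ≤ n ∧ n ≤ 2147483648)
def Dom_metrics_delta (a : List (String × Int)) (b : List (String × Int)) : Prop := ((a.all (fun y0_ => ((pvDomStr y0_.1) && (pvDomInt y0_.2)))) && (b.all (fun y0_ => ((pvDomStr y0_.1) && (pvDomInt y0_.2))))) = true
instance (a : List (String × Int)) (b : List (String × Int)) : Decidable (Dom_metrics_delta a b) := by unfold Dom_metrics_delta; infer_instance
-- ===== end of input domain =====

-- B replaces A's two loops + old_unseen set bookkeeping by one uniform pass over the union of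
-- the two key sets (simpler); Pre_ excludes duplicate-key association lists (not a Python dict).


-- ===== PORT A =====
-- literal transliteration of A: old_unseen = set(a.keys()); one loop over b.items() with a
-- branch and set removal; then a loop over the leftover old_unseen keys.
def metrics_delta (a : List (String × Int)) (b : List (String × Int)) : List (String × Int) :=
  let old_unseen : PySem.Set String := PySem.Set.ofList ((PySem.Dict.mk a).keys)
  let st : PySem.Dict String Int × PySem.Set String :=
    b.foldl (fun st kv =>
      if (PySem.Dict.mk a).contains kv.1 then
        -- old_unseen.remove(k): k is in the set whenever b's keys are unique (Pre_), so the
        -- '.getD st.2' total form of remove? is exact there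
        (st.1.insert kv.1 (kv.2 - (PySem.Dict.mk a).getD kv.1 0), (st.2.remove? kv.1).getD st.2)
      else
        (st.1.insert kv.1 kv.2, st.2))
      (PySem.Dict.empty, old_unseen)
  -- for k in old_unseen: d[k] = 0 - a[k]; every such k is a key of a, so a[k] is getD … 0 (exact)
  (st.2.foldl (fun d k => d.insert k (0 - (PySem.Dict.mk a).getD k 0)) st.1).items

-- ===== PORT B =====
-- literal transliteration of B: {k: b.get(k, 0) - a.get(k, 0) for k in b.keys() | a.keys()}
def metrics_delta_alt (a : List (String × Int)) (b : List (String × Int)) : List (String × Int) :=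
  (PySem.Set.union (PySem.Set.ofList ((PySem.Dict.mk b).keys)) ((PySem.Dict.mk a).keys)).map
    (fun k => (k, (PySem.Dict.mk b).getD k 0 - (PySem.Dict.mk a).getD k 0))

-- ===== PRECONDITION & SPEC =====
-- Pre_ excludes association lists with duplicate keys: those do not represent a Python dict
-- (a dict's keys are unique), so A never receives them.
def Pre_metrics_delta (a : List (String × Int)) (b : List (String × Int)) : Prop :=
  (a.map Prod.fst).Nodup ∧ (b.map Prod.fst).Nodup
instance (a : List (String × Int)) (b : List (String × Int)) : Decidable (Pre_metrics_delta a b) := by unfold Pre_metrics_delta; infer_instance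
def pvWitness_metrics_delta : (List (String × Int)) × (List (String × Int)) :=
  ([("x", 1), ("y", 2)], [("y", 5), ("z", 3)])

def Spec_metrics_delta (a : List (String × Int)) (b : List (String × Int)) (out : List (String × Int)) : Prop := out = metrics_delta_alt a b
instance (a : List (String × Int)) (b : List (String × Int)) (out : List (String × Int)) : Decidable (Spec_metrics_delta a b out) := by unfold Spec_metrics_delta; infer_instance

-- ===== CLAIM (what is proved, stated in full; the proofs are below) =====
def Claim_equal_metrics_delta : Prop := ∀ (a : List (String × Int)) (b : List (String × Int)), Dom_metrics_delta a b → Pre_metrics_delta a b → Spec_metrics_delta a b (metrics_delta a b)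

-- ===== LEMMAS AND PROOFS =====

-- getD on a nodup literal dict returns the stored value of a member pair
theorem getD_mk_of_mem_nodup (l : List (String × Int)) (kv : String × Int)
    (hm : kv ∈ l) (hnd : (l.map Prod.fst).Nodup) :
    (PySem.Dict.mk l).getD kv.1 0 = kv.2 := by
  induction l with
  | nil => cases hm
  | cons p t ih =>
    simp only [List.map_cons, List.nodup_cons] at hnd
    rcases List.mem_cons.mp hm with h | h
    · subst h
      simp [PySem.Dict.getD, PySem.Dict.get?]
    · have hne : ¬ p.1 = kv.1 := by
        intro he; exact hnd.1 (he ▸ List.mem_map_of_mem h)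
      simpa [PySem.Dict.getD, PySem.Dict.get?, List.find?_cons, beq_iff_eq, hne]
        using ih h hnd.2

-- contains on a literal dict is list membership of the key
theorem contains_mk_iff (l : List (String × Int)) (k : String) :
    (PySem.Dict.mk l).contains k = true ↔ k ∈ l.map Prod.fst := by
  simp [PySem.Dict.contains, List.any_eq_true, beq_iff_eq, List.mem_map]

-- remove?(x).getD s is exactly discard
theorem removeD_eq_discard (s : PySem.Set String) (x : String) :
    (s.remove? x).getD s = s.discard x := by
  by_cases h : x ∈ s
  · simp [PySem.Set.remove?, PySem.Set.contains, List.contains_eq_mem, h]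
  · have hd : s.discard x = s := by
      apply List.filter_eq_self.mpr
      intro y hy
      have : ¬ y = x := fun he => h (he ▸ hy)
      simpa using this
    simp [PySem.Set.remove?, PySem.Set.contains, List.contains_eq_mem, h, hd]

-- the first component of A's loop state ignores the set component
theorem loop_fst (a : List (String × Int)) (b : List (String × Int))
    (d : PySem.Dict String Int) (s : PySem.Set String) :
    (b.foldl (fun st kv =>
      if (PySem.Dict.mk a).contains kv.1 then
        (st.1.insert kv.1 (kv.2 - (PySem.Dict.mk a).getD kv.1 0), (st.2.remove? kv.1).getD st.2)
      else
        (st.1.insert kv.1 kv.2, st.2)) (d, s)).1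
    = b.foldl (fun d kv => d.insert kv.1 (kv.2 - (PySem.Dict.mk a).getD kv.1 0)) d := by
  induction b generalizing d s with
  | nil => rfl
  | cons kv t ih =>
    simp only [List.foldl_cons]
    by_cases h : (PySem.Dict.mk a).contains kv.1 = true
    · rw [if_pos h]; exact ih _ _
    · have h0 : (PySem.Dict.mk a).getD kv.1 0 = 0 :=
        PySem.Dict.getD_of_not_contains _ _ (by rw [Bool.eq_false_iff]; exact h)
      rw [if_neg h, h0, sub_zero]
      exact ih _ _

-- the second component: each b-key is discarded from the unseen set (no-op when absent)
theorem loop_snd (a : List (String × Int)) (b : List (String × Int))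
    (d : PySem.Dict String Int) (s : PySem.Set String)
    (hs : ∀ k ∈ s, (PySem.Dict.mk a).contains k = true) :
    (b.foldl (fun st kv =>
      if (PySem.Dict.mk a).contains kv.1 then
        (st.1.insert kv.1 (kv.2 - (PySem.Dict.mk a).getD kv.1 0), (st.2.remove? kv.1).getD st.2)
      else
        (st.1.insert kv.1 kv.2, st.2)) (d, s)).2
    = s.filter (fun k => !(b.map Prod.fst).contains k) := by
  induction b generalizing d s with
  | nil => simp
  | cons kv t ih =>
    simp only [List.foldl_cons]
    have hstep : ∀ d', (t.foldl (fun (st : PySem.Dict String Int × PySem.Set String) kv =>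
        if (PySem.Dict.mk a).contains kv.1 then
          (st.1.insert kv.1 (kv.2 - (PySem.Dict.mk a).getD kv.1 0), (st.2.remove? kv.1).getD st.2)
        else
          (st.1.insert kv.1 kv.2, st.2)) (d', s.discard kv.1)).2
        = (s.discard kv.1).filter (fun k => !(t.map Prod.fst).contains k) := by
      intro d'
      apply ih
      intro k hk
      exact hs k (List.mem_of_mem_filter hk)
    have hcomb : (s.discard kv.1).filter (fun k => !(t.map Prod.fst).contains k)
        = s.filter (fun k => !((kv :: t).map Prod.fst).contains k) := by
      simp only [PySem.Set.discard, List.filter_filter, List.map_cons]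
      apply List.filter_congr
      intro y _
      simp [List.contains_eq_mem, Bool.and_comm]
    by_cases h : (PySem.Dict.mk a).contains kv.1 = true
    · rw [if_pos h, removeD_eq_discard]
      rw [hstep, hcomb]
    · have hns : s.discard kv.1 = s := by
        apply List.filter_eq_self.mpr
        intro y hy
        have : ¬ y = kv.1 := by
          intro he; exact h (he ▸ hs y hy)
        simpa using this
      rw [if_neg h]
      have hst := hstep (d.insert kv.1 kv.2)
      rw [hns] at hst
      rw [hns] at hcomb
      rw [hst, hcomb]

-- Set.update on nodup arguments appends exactly the genuinely new elements
theorem update_eq_append_filter (s : PySem.Set String) (l : List String)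
    (hl : l.Nodup) :
    PySem.Set.update s l = s ++ l.filter (fun x => !List.contains s x) := by
  induction l generalizing s with
  | nil => simp [PySem.Set.update]
  | cons x t ih =>
    have hxt : x ∉ t := (List.nodup_cons.mp hl).1
    have ht : t.Nodup := (List.nodup_cons.mp hl).2
    simp only [PySem.Set.update, List.foldl_cons] at *
    rw [List.filter_cons]
    by_cases h : List.contains s x = true
    · have hm : x ∈ s := by simpa [List.contains_eq_mem] using h
      have hadd : PySem.Set.add s x = s := by
        simp [PySem.Set.add, PySem.Set.contains, hm]
      rw [hadd, ih s ht]
      simp [List.contains_eq_mem, hm]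
    · have hm : x ∉ s := by simpa [List.contains_eq_mem] using h
      have hadd : PySem.Set.add s x = s ++ [x] := by
        simp [PySem.Set.add, PySem.Set.contains, hm]
      rw [hadd, ih (s ++ [x]) ht]
      have hf : t.filter (fun y => !List.contains (s ++ [x]) y)
          = t.filter (fun y => !List.contains s y) := by
        apply List.filter_congr
        intro y hy
        have hne : ¬ y = x := fun he => hxt (he ▸ hy)
        simp [List.contains_eq_mem, hne]
      rw [hf]
      simp [List.contains_eq_mem, hm, List.append_assoc]

-- ===== VERDICT (by name: the statement is the Claim_ definition above) =====
theorem metrics_delta_spec : Claim_equal_metrics_delta := by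
  intro a b _hdom hpre
  obtain ⟨hna, hnb⟩ := hpre
  show metrics_delta a b = metrics_delta_alt a b
  unfold metrics_delta metrics_delta_alt
  have hfst : (fun (x : String × Int) => x.1) = (Prod.fst : String × Int → String) := rfl
  simp only [PySem.Dict.keys_mk, hfst]
  rw [PySem.Set.ofList_eq_self_of_nodup _ hna, PySem.Set.ofList_eq_self_of_nodup _ hnb]
  rw [loop_fst, loop_snd a b _ _ (fun k hk => (contains_mk_iff a k).mpr hk)]
  -- A's first loop inserts every b-key fresh into the empty dict
  have hd1 : (List.foldl (fun d kv => d.insert kv.1 (kv.2 - (PySem.Dict.mk a).getD kv.1 0))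
      PySem.Dict.empty b).items
      = b.map (fun kv => (kv.1, kv.2 - (PySem.Dict.mk a).getD kv.1 0)) := by
    rw [PySem.Dict.items_foldl_insert_fresh b Prod.fst
      (fun kv => kv.2 - (PySem.Dict.mk a).getD kv.1 0) PySem.Dict.empty
      (fun _ _ => rfl) hnb]
    simp [PySem.Dict.empty]
  -- A's second loop inserts the leftover a-keys, all fresh w.r.t. the b-keys
  have hu : ∀ k ∈ (a.map Prod.fst).filter (fun k => !(b.map Prod.fst).contains k),
      (List.foldl (fun d kv => d.insert kv.1 (kv.2 - (PySem.Dict.mk a).getD kv.1 0))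
        PySem.Dict.empty b).contains k = false := by
    intro k hk
    have hkb : ¬ k ∈ b.map Prod.fst := by
      have := (List.mem_filter.mp hk).2
      simpa [List.contains_eq_mem] using this
    rw [Bool.eq_false_iff]
    intro hc
    simp only [PySem.Dict.contains, hd1, List.any_eq_true, List.mem_map] at hc
    rcases hc with ⟨p, ⟨kv, hkv, hpe⟩, he⟩
    exact hkb (by
      rw [← hpe] at he
      simp only [beq_iff_eq] at he
      exact he ▸ List.mem_map_of_mem hkv)
  rw [PySem.Dict.items_foldl_insert_fresh
      ((a.map Prod.fst).filter (fun k => !(b.map Prod.fst).contains k)) (fun k => k)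
      (fun k => 0 - (PySem.Dict.mk a).getD k 0) _ hu
      (by simpa using (List.Nodup.filter _ hna))]
  rw [hd1]
  -- B: the union is the b-keys followed by exactly the leftover a-keys
  simp only [PySem.Set.union]
  rw [update_eq_append_filter _ _ hna]
  rw [List.map_append]
  congr 1
  · -- over b's keys the stored value is getD of b
    rw [List.map_map]
    apply List.map_congr_left
    intro kv hkv
    simp only [Function.comp]
    rw [getD_mk_of_mem_nodup b kv hkv hnb]
  · -- over the leftover a-keys getD of b is 0
    apply List.map_congr_left
    intro k hk
    have hkb : ¬ k ∈ b.map Prod.fst := by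
      have := (List.mem_filter.mp hk).2
      simpa [List.contains_eq_mem] using this
    have h0 : (PySem.Dict.mk b).getD k 0 = 0 := by
      apply PySem.Dict.getD_of_not_contains
      rw [Bool.eq_false_iff]
      intro hc
      exact hkb ((contains_mk_iff b k).mp hc)
    rw [h0]
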